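-- pv_equiv track=rewrite | github.com/Berendei-Jr/descrete_maths | fields.py | mult_stolbik
-- ===== SOURCE A (Python) =====
-- def mult_stolbik(array1, array2, z):
--     result_array_size = len(array1)+len(array2)-1
--     strings = []
--     for second_index in range(len(array2)-1, -1, -1):
--         string = [0 for i in range(len(array1))]
--         for first_index in range(len(array1)-1, -1, -1):
--             string[first_index] = (array1[first_index] * array2[second_index]) % z
--         for i in range(second_index):
--             string.insert(0, 0)
--         for i in range(result_array_size - len(string)):
--             string.append(0)
--         strings.append(string)
--     new_array = []
--     for i in range(result_array_size):
--         v = 0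
--         for string in strings:
--             v = (v + string[i]) % z
--         new_array.append(v)
--     return new_array
-- ===== SOURCE B (Python) =====
-- def mult_stolbik(array1, array2, z):
--     result = [0] * (len(array1) + len(array2) - 1)
--     for i, a in enumerate(array1):
--         for j, b in enumerate(array2):
--             result[i + j] = (result[i + j] + a * b) % z
--     return result
-- ===== Notes on version B (the rewrite author's own statement) =====
-- stated objective: faster
-- what changed: A materializes one shifted zero-padded row per coefficient of array2 (insert/append padding) and then sums the table column by column; B does a direct in-place convolution, accumulating result[i+j] = (result[i+j] + a*b) % z in a single pair of nested loops, with no intermediate table.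
import Mathlib
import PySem

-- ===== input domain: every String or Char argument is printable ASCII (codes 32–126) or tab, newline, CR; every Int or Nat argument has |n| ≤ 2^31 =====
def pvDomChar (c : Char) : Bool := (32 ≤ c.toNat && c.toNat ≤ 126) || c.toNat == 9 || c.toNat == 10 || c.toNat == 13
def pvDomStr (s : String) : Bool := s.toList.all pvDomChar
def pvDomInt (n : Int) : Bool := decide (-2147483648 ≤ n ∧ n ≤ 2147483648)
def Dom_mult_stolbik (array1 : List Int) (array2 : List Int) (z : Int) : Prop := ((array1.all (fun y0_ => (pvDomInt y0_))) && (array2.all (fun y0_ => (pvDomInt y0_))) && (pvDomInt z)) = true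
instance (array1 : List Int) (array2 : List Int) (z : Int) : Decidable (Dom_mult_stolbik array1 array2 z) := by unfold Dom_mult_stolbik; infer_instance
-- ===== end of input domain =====

-- B replaces A's per-row shifted-and-padded "столбик" tables (O(m·(n+m)) work and memory, then a
-- column-by-column sum) by a single in-place convolution accumulating result[i+j]; same return value.

-- ===== PORT A =====
def mult_stolbik (array1 : List Int) (array2 : List Int) (z : Int) : List Int :=
  let result_array_size : Int := PySem.List.len array1 + PySem.List.len array2 - 1
  let strings : List (List Int) :=
    (PySem.List.pyRange (PySem.List.len array2 - 1) (-1) (-1)).foldl (fun strings second_index =>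
      let string : List Int := (PySem.List.pyRange 0 (PySem.List.len array1) 1).map (fun _ => 0)
      let string : List Int :=
        (PySem.List.pyRange (PySem.List.len array1 - 1) (-1) (-1)).foldl (fun string first_index =>
          PySem.List.pySetD string first_index
            (PySem.Int.mod (PySem.List.pyGetD array1 first_index 0 * PySem.List.pyGetD array2 second_index 0) z)) string
      let string : List Int :=
        (PySem.List.pyRange 0 second_index 1).foldl (fun string _ => PySem.List.insert string 0 0) string
      let string : List Int :=
        (PySem.List.pyRange 0 (result_array_size - PySem.List.len string) 1).foldl (fun string _ => string ++ [0]) string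
      strings ++ [string]) []
  (PySem.List.pyRange 0 result_array_size 1).foldl (fun new_array i =>
    new_array ++ [strings.foldl (fun v string => PySem.Int.mod (v + PySem.List.pyGetD string i 0) z) 0]) []

-- ===== PORT B =====
def mult_stolbik_alt (array1 : List Int) (array2 : List Int) (z : Int) : List Int :=
  let result : List Int := PySem.List.pyRepeat [0] (PySem.List.len array1 + PySem.List.len array2 - 1)
  (PySem.List.enumerate array1).foldl (fun result ia =>
    (PySem.List.enumerate array2).foldl (fun result jb =>
      PySem.List.pySetD result (ia.1 + jb.1)
        (PySem.Int.mod (PySem.List.pyGetD result (ia.1 + jb.1) 0 + ia.2 * jb.2) z)) result) result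

-- ===== PRECONDITION & SPEC =====
-- Pre_ excludes exactly the inputs on which Python A raises ZeroDivisionError: z == 0 while some
-- '% z' is actually executed (i.e. unless array2 is empty, or array1 is empty and len(array2) == 1).
def Pre_mult_stolbik (array1 : List Int) (array2 : List Int) (z : Int) : Prop :=
  z ≠ 0 ∨ array2 = [] ∨ (array1 = [] ∧ array2.length = 1)
instance (array1 : List Int) (array2 : List Int) (z : Int) : Decidable (Pre_mult_stolbik array1 array2 z) := by unfold Pre_mult_stolbik; infer_instance
def pvWitness_mult_stolbik : List Int × List Int × Int := ([1, 2], [3, 4], 7)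


def Spec_mult_stolbik (array1 : List Int) (array2 : List Int) (z : Int) (out : List Int) : Prop := out = mult_stolbik_alt array1 array2 z
instance (array1 : List Int) (array2 : List Int) (z : Int) (out : List Int) : Decidable (Spec_mult_stolbik array1 array2 z out) := by unfold Spec_mult_stolbik; infer_instance

-- ===== CLAIM (what is proved, stated in full; the proofs are below) =====
def Claim_equal_mult_stolbik : Prop := ∀ (array1 : List Int) (array2 : List Int) (z : Int), Dom_mult_stolbik array1 array2 z → Pre_mult_stolbik array1 array2 z → Spec_mult_stolbik array1 array2 z (mult_stolbik array1 array2 z)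

-- ===== LEMMAS AND PROOFS =====

-- the term contributed at output position p by a2-index j (A's row view) resp. a1-index k (B's view)
def pvRawA (a1 a2 : List Int) (p j : ℕ) : Int :=
  if j ≤ p ∧ p - j < a1.length then a1.getD (p - j) 0 * a2.getD j 0 else 0
def pvRawB (a1 a2 : List Int) (p k : ℕ) : Int :=
  if k ≤ p ∧ p - k < a2.length then a1.getD k 0 * a2.getD (p - k) 0 else 0
def pvConvA (a1 a2 : List Int) (p : ℕ) : Int := ∑ j ∈ Finset.range a2.length, pvRawA a1 a2 p j
def pvConvB (a1 a2 : List Int) (p : ℕ) : Int := ∑ k ∈ Finset.range a1.length, pvRawB a1 a2 p k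

-- the fully padded row A builds for second_index = si
def pvFull (a1 a2 : List Int) (z : Int) (si : ℕ) : List Int :=
  List.replicate si 0 ++
    (List.range a1.length).map (fun k => PySem.Int.mod (a1.getD k 0 * a2.getD si 0) z) ++
    List.replicate (a2.length - 1 - si) 0

-- ---- arithmetic of Python % ----
lemma pv_mod_zero (z : Int) : PySem.Int.mod 0 z = 0 := Int.zero_fmod z

lemma pv_mod_mod_add (a x z : Int) :
    PySem.Int.mod (PySem.Int.mod a z + x) z = PySem.Int.mod (a + x) z := Int.fmod_add_fmod a z x

lemma pv_mod_add_congr (a b b' z : Int) (h : PySem.Int.mod b z = PySem.Int.mod b' z) :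
    PySem.Int.mod (a + b) z = PySem.Int.mod (a + b') z := by
  show (a + b).fmod z = (a + b').fmod z
  rw [Int.add_fmod a b z, Int.add_fmod a b' z]
  show _ = (a.fmod z + PySem.Int.mod b' z).fmod z
  rw [← h]; rfl

-- foldl of (v + x) % z collapses to (a + sum) % z
lemma pv_foldl_mod (z : Int) : ∀ (xs : List Int) (a : Int),
    xs.foldl (fun v x => PySem.Int.mod (v + x) z) (PySem.Int.mod a z) = PySem.Int.mod (a + xs.sum) z := by
  intro xs
  induction xs with
  | nil => intro a; simp
  | cons x t ih =>
    intro a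
    simp only [List.foldl_cons, List.sum_cons]
    rw [pv_mod_mod_add, ih (a + x), add_assoc]

lemma pv_foldl_mod_zero (z : Int) (xs : List Int) :
    xs.foldl (fun v x => PySem.Int.mod (v + x) z) 0 = PySem.Int.mod xs.sum z := by
  rw [← pv_mod_zero z, pv_foldl_mod, zero_add]

-- a sum of already-reduced terms reduces to the reduced raw sum
lemma pv_mod_sum_mod (z : Int) (t : ℕ) (f : ℕ → Int) :
    PySem.Int.mod (∑ j ∈ Finset.range t, PySem.Int.mod (f j) z) z
      = PySem.Int.mod (∑ j ∈ Finset.range t, f j) z := by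
  induction t with
  | zero => simp
  | succ t ih =>
    rw [Finset.sum_range_succ, Finset.sum_range_succ]
    rw [add_comm _ (PySem.Int.mod (f t) z), add_comm _ (f t)]
    rw [show PySem.Int.mod (PySem.Int.mod (f t) z + ∑ j ∈ Finset.range t, PySem.Int.mod (f j) z) z
          = PySem.Int.mod (f t + ∑ j ∈ Finset.range t, PySem.Int.mod (f j) z) z from
        pv_mod_mod_add _ _ z]
    exact pv_mod_add_congr _ _ _ z ih

-- ---- generic list facts ----
lemma pv_getD_set (xs : List Int) (n m : ℕ) (v : Int) :
    (xs.set n v).getD m 0 = if m = n ∧ n < xs.length then v else xs.getD m 0 := by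
  by_cases hm : m < xs.length
  · rw [List.getD_eq_getElem _ _ (by simpa using hm), List.getD_eq_getElem _ _ hm, List.getElem_set]
    by_cases h : n = m
    · subst h; simp [hm]
    · rw [if_neg h, if_neg (by tauto)]
  · rw [List.getD_eq_default _ _ (by simpa using hm), List.getD_eq_default _ _ (by omega),
      if_neg (by omega)]

lemma pv_getD_replicate (c p : ℕ) : (List.replicate c (0:Int)).getD p 0 = 0 := by
  by_cases h : p < c
  · rw [List.getD_eq_getElem _ _ (by simpa using h), List.getElem_replicate]
  · rw [List.getD_eq_default _ _ (by simpa using h)]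

lemma pv_list_sum_range (f : ℕ → Int) (m : ℕ) :
    ((List.range m).map f).sum = ∑ j ∈ Finset.range m, f j := rfl

-- ---- A-side loop shapes ----
lemma pv_init_string (n : ℕ) :
    (PySem.List.pyRange 0 (n : Int) 1).map (fun _ => (0:Int)) = List.replicate n 0 := by
  have h : ∀ (l : List Int), l.map (fun _ => (0:Int)) = List.replicate l.length 0 := by
    intro l
    induction l with
    | nil => rfl
    | cons x t ih => simp only [List.map_cons, ih, List.length_cons, List.replicate_succ]
  rw [h, PySem.List.length_pyRange_one, Int.sub_zero, Int.toNat_natCast]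

lemma pv_set_loop (f : Int → Int) : ∀ (c : ℕ) (s : List Int), c ≤ s.length →
    (PySem.List.pyRange ((c : Int) - 1) (-1) (-1)).foldl (fun st fi => PySem.List.pySetD st fi (f fi)) s
      = List.map (fun k : ℕ => f (k : Int)) (List.range c) ++ s.drop c := by
  intro c
  induction c with
  | zero =>
    intro s _
    rw [PySem.List.pyRange_neg_one_eq_nil (by norm_num)]
    simp
  | succ c ih =>
    intro s hc
    have h1 : ((c + 1 : ℕ) : Int) - 1 = (c : Int) := by push_cast; ring
    rw [h1, PySem.List.pyRange_neg_one_cons (by omega)]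
    simp only [List.foldl_cons]
    have hset : PySem.List.pySetD s (c : Int) (f (c : Int)) = s.set c (f (c : Int)) := by
      simp
    rw [hset, ih (s.set c (f (c : Int))) (by rw [List.length_set]; omega)]
    have hdrop : (s.set c (f (c : Int))).drop c = f (c : Int) :: s.drop (c + 1) := by
      rw [List.drop_set, if_neg (by omega), Nat.sub_self,
        List.drop_eq_getElem_cons (by omega : c < s.length), List.set_cons_zero]
    rw [hdrop, List.range_succ, List.map_append]
    simp

lemma pv_insert_loop : ∀ (l : List Int) (s : List Int),
    l.foldl (fun st _ => PySem.List.insert st 0 (0:Int)) s = List.replicate l.length 0 ++ s := by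
  intro l
  induction l with
  | nil => intro s; simp
  | cons x t ih =>
    intro s
    rw [List.foldl_cons, ih, PySem.List.insert_zero, List.length_cons,
      List.replicate_succ', List.append_assoc]
    rfl

lemma pv_foldl_mod_zero' {α : Type} (z : Int) (e : α → Int) (l : List α) :
    l.foldl (fun v x => PySem.Int.mod (v + e x) z) 0 = PySem.Int.mod ((l.map e).sum) z := by
  rw [← pv_foldl_mod_zero, List.foldl_map]

lemma pv_getD_append (l l' : List Int) (p : ℕ) :
    (l ++ l').getD p 0 = if p < l.length then l.getD p 0 else l'.getD (p - l.length) 0 := by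
  by_cases h : p < l.length
  · rw [if_pos h, List.getD_eq_getElem _ _ (by simp only [List.length_append]; omega),
      List.getD_eq_getElem _ _ h, List.getElem_append_left h]
  · rw [if_neg h]
    by_cases h2 : p < l.length + l'.length
    · rw [List.getD_eq_getElem _ _ (by simp only [List.length_append]; omega),
        List.getD_eq_getElem _ _ (by omega), List.getElem_append_right (by omega)]
    · rw [List.getD_eq_default _ _ (by simp only [List.length_append]; omega),
        List.getD_eq_default _ _ (by omega)]

-- every entry of the padded row, at every position
lemma pv_full_getD (a1 a2 : List Int) (z : Int) (si p : ℕ) :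
    (pvFull a1 a2 z si).getD p 0
      = PySem.Int.mod (pvRawA a1 a2 p si) z := by
  unfold pvFull pvRawA
  rw [List.append_assoc, pv_getD_append, pv_getD_append]
  simp only [List.length_replicate, List.length_map, List.length_range]
  by_cases h1 : p < si
  · rw [if_pos h1, pv_getD_replicate, if_neg (by omega), pv_mod_zero]
  · rw [if_neg h1]
    by_cases h2 : p - si < a1.length
    · rw [if_pos h2, if_pos ⟨by omega, h2⟩,
        List.getD_eq_getElem _ _ (by simpa using h2), List.getElem_map, List.getElem_range]
    · rw [if_neg h2, pv_getD_replicate, if_neg (by omega), pv_mod_zero]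

-- one iteration of A's outer loop builds exactly the padded row pvFull
lemma pv_row (a1 a2 : List Int) (z : Int) (si : Int) (h0 : 0 ≤ si) (h1 : si < (a2.length : Int)) :
    (List.foldl (fun string _ => PySem.List.insert string 0 (0:Int))
        (List.foldl (fun string first_index =>
            PySem.List.pySetD string first_index
              (PySem.Int.mod (PySem.List.pyGetD a1 first_index 0 * PySem.List.pyGetD a2 si 0) z))
          (List.map (fun _ => (0:Int)) (PySem.List.pyRange 0 (a1.length : Int)))
          (PySem.List.pyRange ((a1.length : Int) - 1) (-1) (-1)))
        (PySem.List.pyRange 0 si)) ++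
      List.map (fun _ => (0:Int))
        (PySem.List.pyRange 0
          ((a1.length : Int) + (a2.length : Int) - 1 -
            ((List.foldl (fun string _ => PySem.List.insert string 0 (0:Int))
                (List.foldl (fun string first_index =>
                    PySem.List.pySetD string first_index
                      (PySem.Int.mod (PySem.List.pyGetD a1 first_index 0 * PySem.List.pyGetD a2 si 0) z))
                  (List.map (fun _ => (0:Int)) (PySem.List.pyRange 0 (a1.length : Int)))
                  (PySem.List.pyRange ((a1.length : Int) - 1) (-1) (-1)))
                (PySem.List.pyRange 0 si)).length : Int)))
    = pvFull a1 a2 z si.toNat := by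
  have hga2 : PySem.List.pyGetD a2 si 0 = a2.getD si.toNat 0 := by
    rw [PySem.List.pyGetD_eq_getElem a2 0 h0 (by exact_mod_cast h1),
      List.getD_eq_getElem _ _ (by omega)]
  rw [pv_init_string a1.length, pv_set_loop (fun fi => PySem.Int.mod (PySem.List.pyGetD a1 fi 0 * PySem.List.pyGetD a2 si 0) z)
      a1.length (List.replicate a1.length 0) (by simp), List.drop_replicate]
  simp only [Nat.sub_self, List.replicate_zero, List.append_nil]
  have e2 : (fun k : ℕ => PySem.Int.mod (PySem.List.pyGetD a1 (k : Int) 0 * PySem.List.pyGetD a2 si 0) z)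
      = (fun k : ℕ => PySem.Int.mod (a1.getD k 0 * a2.getD si.toNat 0) z) :=
    funext (fun k => by rw [PySem.List.pyGetD_natCast, hga2])
  rw [e2, pv_insert_loop,
    show (PySem.List.pyRange 0 si).length = si.toNat from by
      rw [PySem.List.length_pyRange_one, Int.sub_zero]]
  have e4 : ∀ (l : List Int), List.map (fun _ => (0:Int)) l = List.replicate l.length 0 := by
    intro l
    induction l with
    | nil => rfl
    | cons a t ih => simp only [List.map_cons, ih, List.length_cons, List.replicate_succ]
  rw [e4,
    show ((List.replicate si.toNat (0:Int) ++
        List.map (fun k : ℕ => PySem.Int.mod (a1.getD k 0 * a2.getD si.toNat 0) z)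
          (List.range a1.length)).length : Int) = ((si.toNat + a1.length : ℕ) : Int) from by simp,
    show (PySem.List.pyRange 0 ((a1.length : Int) + (a2.length : Int) - 1 -
        ((si.toNat + a1.length : ℕ) : Int))).length = a2.length - 1 - si.toNat from by
      rw [PySem.List.length_pyRange_one, Int.sub_zero]; omega]
  unfold pvFull
  rfl

-- characterization of the strings table: row k is the padded row for second_index = m-1-k

-- characterization of port A
lemma pv_A_eq (a1 a2 : List Int) (z : Int) :
    mult_stolbik a1 a2 z
      = (List.range (a1.length + a2.length - 1)).map (fun p => PySem.Int.mod (pvConvA a1 a2 p) z) := by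
  simp only [mult_stolbik, PySem.List.len_eq, PySem.List.foldl_append_singleton_eq_map,
    List.nil_append]
  have hrange : PySem.List.pyRange ((a2.length : Int) - 1) (-1) (-1)
      = List.map (fun k : ℕ => (a2.length : Int) - 1 - (k : Int)) (List.range a2.length) := by
    rw [PySem.List.pyRange_neg_one,
      show ((a2.length : Int) - 1 - (-1)).toNat = a2.length from by omega]
  simp only [hrange, List.map_map]
  apply List.ext_getElem
  · simp only [List.length_map, PySem.List.length_pyRange_one, List.length_range]
    omega
  · intro p h1 h2
    simp only [List.getElem_map, PySem.List.getElem_pyRange_one, List.getElem_range, zero_add]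
    rw [pv_foldl_mod_zero', List.map_map, pv_list_sum_range]
    trans PySem.Int.mod
        (∑ k ∈ Finset.range a2.length, PySem.Int.mod (pvRawA a1 a2 p (a2.length - 1 - k)) z) z
    · congr 1
      refine Finset.sum_congr rfl (fun k hk => ?_)
      have hk' : k < a2.length := Finset.mem_range.mp hk
      simp only [Function.comp_apply]
      rw [pv_row a1 a2 z ((a2.length : Int) - 1 - (k : Int)) (by omega) (by omega),
        PySem.List.pyGetD_natCast, pv_full_getD,
        show ((a2.length : Int) - 1 - (k : Int)).toNat = a2.length - 1 - k from by omega]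
    · rw [Finset.sum_range_reflect (fun j => PySem.Int.mod (pvRawA a1 a2 p j) z) a2.length,
        pv_mod_sum_mod]
      rfl

-- B's inner loop: one pass over array2, writing at offsets i + s, i + s + 1, …
lemma pv_inner (z a i : Int) (hi : 0 ≤ i) : ∀ (l : List Int) (s : Int) (res : List Int), 0 ≤ s →
    (i + s).toNat + l.length ≤ res.length →
    (((PySem.List.enumerate l s).foldl (fun r jb =>
        PySem.List.pySetD r (i + jb.1)
          (PySem.Int.mod (PySem.List.pyGetD r (i + jb.1) 0 + a * jb.2) z)) res).length = res.length
    ∧ ∀ p : ℕ, p < res.length →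
      ((PySem.List.enumerate l s).foldl (fun r jb =>
          PySem.List.pySetD r (i + jb.1)
            (PySem.Int.mod (PySem.List.pyGetD r (i + jb.1) 0 + a * jb.2) z)) res).getD p 0
        = if (i + s).toNat ≤ p ∧ p - (i + s).toNat < l.length
            then PySem.Int.mod (res.getD p 0 + a * l.getD (p - (i + s).toNat) 0) z
            else res.getD p 0) := by
  intro l
  induction l with
  | nil =>
    intro s res _ _
    simp only [PySem.List.enumerate_nil, List.foldl_nil, List.length_nil]
    exact ⟨by simp, fun p _ => by rw [if_neg (by omega)]⟩
  | cons b t ih =>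
    intro s res hs hlen
    simp only [PySem.List.enumerate_cons, List.foldl_cons, List.length_cons] at *
    set w : ℕ := (i + s).toNat with hw
    have hwlt : w < res.length := by omega
    have hg : PySem.List.pyGetD res (i + s) 0 = res.getD w 0 := by
      rw [PySem.List.pyGetD_eq_getElem res 0 (by omega) (by omega),
        List.getD_eq_getElem _ _ hwlt]
    have hset : PySem.List.pySetD res (i + s)
        (PySem.Int.mod (PySem.List.pyGetD res (i + s) 0 + a * b) z)
        = res.set w (PySem.Int.mod (res.getD w 0 + a * b) z) := by
      rw [PySem.List.pySetD_of_nonneg _ _ (by omega), hg]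
    rw [hset]
    set v : Int := PySem.Int.mod (res.getD w 0 + a * b) z with hv
    obtain ⟨ihlen, ihget⟩ := ih (s + 1) (res.set w v) (by omega)
      (by rw [List.length_set]; omega)
    have hw1 : (i + (s + 1)).toNat = w + 1 := by omega
    refine ⟨by rw [ihlen, List.length_set], fun p hp => ?_⟩
    rw [ihget p (by rw [List.length_set]; exact hp), hw1, pv_getD_set]
    by_cases hpw : p = w
    · subst hpw
      rw [if_neg (by omega), if_pos ⟨rfl, hwlt⟩,
        if_pos (⟨le_refl w, by omega⟩ : w ≤ w ∧ w - w < t.length + 1),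
        Nat.sub_self, List.getD_cons_zero]
    · by_cases hc : w + 1 ≤ p ∧ p - (w + 1) < t.length
      · rw [if_pos hc, if_neg (fun h => hpw h.1),
          if_pos (⟨by omega, by omega⟩ : w ≤ p ∧ p - w < t.length + 1),
          show p - w = (p - (w + 1)) + 1 from by omega, List.getD_cons_succ]
      · rw [if_neg hc, if_neg (fun h => hpw h.1), if_neg (by omega)]

-- B's outer loop: accumulated invariant over a prefix of array1
lemma pv_outer (a2 : List Int) (z : Int) : ∀ (suf : List Int) (s : ℕ) (res : List Int) (Q : ℕ → Int),
    s + suf.length + a2.length ≤ res.length + 1 →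
    (∀ p : ℕ, p < res.length → res.getD p 0 = PySem.Int.mod (Q p) z) →
    (((PySem.List.enumerate suf (s : Int)).foldl (fun r ia =>
        (PySem.List.enumerate a2 0).foldl (fun r2 jb =>
          PySem.List.pySetD r2 (ia.1 + jb.1)
            (PySem.Int.mod (PySem.List.pyGetD r2 (ia.1 + jb.1) 0 + ia.2 * jb.2) z)) r) res).length
      = res.length
    ∧ ∀ p : ℕ, p < res.length →
      ((PySem.List.enumerate suf (s : Int)).foldl (fun r ia =>
          (PySem.List.enumerate a2 0).foldl (fun r2 jb =>
            PySem.List.pySetD r2 (ia.1 + jb.1)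
              (PySem.Int.mod (PySem.List.pyGetD r2 (ia.1 + jb.1) 0 + ia.2 * jb.2) z)) r) res).getD p 0
        = PySem.Int.mod (Q p + ∑ k ∈ Finset.range suf.length,
            (if s + k ≤ p ∧ p - (s + k) < a2.length
              then suf.getD k 0 * a2.getD (p - (s + k)) 0 else 0)) z) := by
  intro suf
  induction suf with
  | nil =>
    intro s res Q _ hQ
    simp only [PySem.List.enumerate_nil, List.foldl_nil, List.length_nil]
    exact ⟨by simp, fun p hp => by
      rw [hQ p hp]
      simp only [Finset.range_zero, Finset.sum_empty, add_zero]⟩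
  | cons x rest ih =>
    intro s res Q hlen hQ
    simp only [PySem.List.enumerate_cons, List.foldl_cons, List.length_cons] at *
    obtain ⟨hl1, hg1⟩ := pv_inner z x (s : Int) (by omega) a2 0 res (le_refl 0)
      (by omega)
    set res1 := (PySem.List.enumerate a2 0).foldl (fun r2 jb =>
      PySem.List.pySetD r2 ((s : Int) + jb.1)
        (PySem.Int.mod (PySem.List.pyGetD r2 ((s : Int) + jb.1) 0 + x * jb.2) z)) res with hres1
    have hs0 : ((s : Int) + 0).toNat = s := by omega
    have hinv1 : ∀ p : ℕ, p < res1.length →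
        res1.getD p 0 = PySem.Int.mod
          (Q p + (if s ≤ p ∧ p - s < a2.length then x * a2.getD (p - s) 0 else 0)) z := by
      intro p hp
      have hp' : p < res.length := by rw [← hl1]; exact hp
      rw [hg1 p hp', hs0]
      by_cases hc : s ≤ p ∧ p - s < a2.length
      · rw [if_pos hc, if_pos hc, hQ p hp', pv_mod_mod_add]
      · rw [if_neg hc, if_neg hc, hQ p hp', add_zero]
    have hcast : ((s : Int) + 1) = (((s + 1 : ℕ) : Int)) := by push_cast; ring
    rw [hcast]
    obtain ⟨ihl, ihg⟩ := ih (s + 1) res1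
      (fun p => Q p + (if s ≤ p ∧ p - s < a2.length then x * a2.getD (p - s) 0 else 0))
      (by rw [hl1]; omega) hinv1
    refine ⟨by rw [ihl, hl1], fun p hp => ?_⟩
    rw [ihg p (by rw [hl1]; exact hp)]
    congr 1
    rw [Finset.sum_range_succ']
    have hterm : ∀ k : ℕ,
        (if s + (k + 1) ≤ p ∧ p - (s + (k + 1)) < a2.length
          then (x :: rest).getD (k + 1) 0 * a2.getD (p - (s + (k + 1))) 0 else 0)
        = (if s + 1 + k ≤ p ∧ p - (s + 1 + k) < a2.length
          then rest.getD k 0 * a2.getD (p - (s + 1 + k)) 0 else 0) := by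
      intro k
      rw [show s + (k + 1) = s + 1 + k from by omega, List.getD_cons_succ]
    simp only [hterm, Nat.add_zero, List.getD_cons_zero]
    ring

-- characterization of port B
lemma pv_B_eq (a1 a2 : List Int) (z : Int) :
    mult_stolbik_alt a1 a2 z
      = (List.range (a1.length + a2.length - 1)).map (fun p => PySem.Int.mod (pvConvB a1 a2 p) z) := by
  simp only [mult_stolbik_alt, PySem.List.len_eq, PySem.List.pyRepeat_singleton]
  have hL : (((a1.length : Int) + (a2.length : Int) - 1)).toNat = a1.length + a2.length - 1 := by
    omega
  rw [hL]
  obtain ⟨hlen, hget⟩ := pv_outer a2 z a1 0 (List.replicate (a1.length + a2.length - 1) 0)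
    (fun _ => 0)
    (by simp only [List.length_replicate]; omega)
    (fun p hp => by rw [pv_getD_replicate, pv_mod_zero])
  simp only [Nat.cast_zero, List.length_replicate] at hlen hget
  apply List.ext_getElem
  · rw [hlen]
    simp
  · intro p h1 h2
    rw [← List.getD_eq_getElem _ 0 h1, ← List.getD_eq_getElem _ 0 h2]
    have hp : p < a1.length + a2.length - 1 := by
      simpa using h2
    rw [hget p hp, List.getD_eq_getElem _ _ h2, List.getElem_map, List.getElem_range]
    simp only [zero_add]
    rfl

-- the two convolution sums coincide (reindex j ↦ p - j)
lemma pv_conv_eq (a1 a2 : List Int) (p : ℕ) : pvConvA a1 a2 p = pvConvB a1 a2 p := by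
  unfold pvConvA pvConvB
  have hext : ∀ (t : ℕ) (f : ℕ → Int), (∀ j, (t ≤ j ∨ p < j) → f j = 0) →
      ∑ j ∈ Finset.range t, f j = ∑ j ∈ Finset.range (p + 1), f j := by
    intro t f hf
    rcases le_total t (p + 1) with h | h
    · exact Finset.sum_subset
        (fun x hx => Finset.mem_range.mpr (by simp only [Finset.mem_range] at hx; omega))
        (fun j _ hj => hf j (Or.inl (by simp only [Finset.mem_range] at hj; omega)))
    · exact (Finset.sum_subset
        (fun x hx => Finset.mem_range.mpr (by simp only [Finset.mem_range] at hx; omega))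
        (fun j _ hj => hf j (Or.inr (by simp only [Finset.mem_range] at hj; omega)))).symm
  have hA : ∑ j ∈ Finset.range a2.length, pvRawA a1 a2 p j
      = ∑ j ∈ Finset.range (p + 1), (if j < a2.length then pvRawA a1 a2 p j else 0) := by
    rw [← hext a2.length _ ?_]
    · exact Finset.sum_congr rfl (fun j hj => by rw [if_pos (by simpa using hj)])
    · intro j hj
      rcases hj with hj | hj
      · rw [if_neg (by omega)]
      · by_cases h : j < a2.length
        · rw [if_pos h]; unfold pvRawA; rw [if_neg (by omega)]
        · rw [if_neg h]
  have hB : ∑ k ∈ Finset.range a1.length, pvRawB a1 a2 p k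
      = ∑ k ∈ Finset.range (p + 1), (if k < a1.length then pvRawB a1 a2 p k else 0) := by
    rw [← hext a1.length _ ?_]
    · exact Finset.sum_congr rfl (fun k hk => by rw [if_pos (by simpa using hk)])
    · intro k hk
      rcases hk with hk | hk
      · rw [if_neg (by omega)]
      · by_cases h : k < a1.length
        · rw [if_pos h]; unfold pvRawB; rw [if_neg (by omega)]
        · rw [if_neg h]
  rw [hA, hB]
  rw [← Finset.sum_range_reflect (fun j => if j < a2.length then pvRawA a1 a2 p j else 0) (p + 1)]
  refine Finset.sum_congr rfl (fun k hk => ?_)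
  have hkp : k ≤ p := by simpa [Nat.lt_succ_iff] using hk
  have hidx : p + 1 - 1 - k = p - k := by omega
  rw [hidx]
  unfold pvRawA pvRawB
  rw [Nat.sub_sub_self hkp]
  split_ifs <;> first | rfl | omega

-- ===== VERDICT (by name: the statement is the Claim_ definition above) =====
theorem mult_stolbik_spec : Claim_equal_mult_stolbik := by
  intro a1 a2 z _ _
  show mult_stolbik a1 a2 z = mult_stolbik_alt a1 a2 z
  rw [pv_A_eq, pv_B_eq]
  exact List.map_congr_left (fun p _ => by rw [pv_conv_eq])
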